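-- pv_equiv track=rewrite | github.com/JellevanKoppen/advent_of_code_jelle | day5/day5.py | get_instructions
-- ===== SOURCE A (Python) =====
-- def get_instructions(puzzle_input):
--     retrieving_order = True
--     orders = []
--     instructions = []
--     for line in puzzle_input:
--         if line == "":
--             retrieving_order = False
--             continue
--         if retrieving_order:
--             orders.append(line)
--         else:
--             instructions.append([int(x) for x in line.split(",")])
--     return orders,instructions
-- ===== SOURCE B (Python) =====
-- def get_instructions(puzzle_input):
--     lines = list(puzzle_input)
--     try:
--         idx = lines.index("")
--     except ValueError:
--         return lines, []
--     orders = lines[:idx]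
--     instructions = [[int(x) for x in line.split(",")]
--                     for line in lines[idx + 1:] if line != ""]
--     return orders, instructions
-- ===== Notes on version B (the rewrite author's own statement) =====
-- stated objective: simpler
-- what changed: Replaces the stateful flag-driven loop by locating the first blank line once and slicing: orders = lines before it, instructions parsed from the non-empty remainder via comprehensions.
import Mathlib
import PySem

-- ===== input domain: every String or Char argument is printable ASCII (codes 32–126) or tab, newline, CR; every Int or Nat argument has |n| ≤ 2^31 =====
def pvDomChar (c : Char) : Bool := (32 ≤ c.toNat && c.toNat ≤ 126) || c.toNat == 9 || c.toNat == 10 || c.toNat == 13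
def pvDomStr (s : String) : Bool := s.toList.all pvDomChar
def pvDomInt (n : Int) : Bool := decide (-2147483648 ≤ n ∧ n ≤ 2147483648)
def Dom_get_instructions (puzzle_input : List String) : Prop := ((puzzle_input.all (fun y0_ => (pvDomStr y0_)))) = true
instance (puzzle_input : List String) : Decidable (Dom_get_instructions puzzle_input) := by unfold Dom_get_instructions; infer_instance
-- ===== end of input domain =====

-- B replaces A's stateful flag-driven loop with find-first-blank + slices + comprehensions (simpler decomposition, same cost).

-- ===== PORT A =====
-- [int(x) for x in line.split(",")]; Pre_ guarantees each ofStr? is some, so getD 0 is never the defaulted case on admitted inputs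
def pvParseLine (line : String) : List Int :=
  ((PySem.Str.split? line ",").getD []).map (fun x => (PySem.Int.ofStr? x).getD 0)

-- the loop body of A's for-loop (state: retrieving_order, orders, instructions)
def pvStepA (st : Bool × List String × List (List Int)) (line : String) :
    Bool × List String × List (List Int) :=
  if line = "" then (false, st.2.1, st.2.2)
  else if st.1 then (st.1, st.2.1 ++ [line], st.2.2)
  else (st.1, st.2.1, st.2.2 ++ [pvParseLine line])

def get_instructions (puzzle_input : List String) : List String × List (List Int) :=
  let s := puzzle_input.foldl pvStepA (true, [], [])
  (s.2.1, s.2.2)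

-- ===== PORT B =====
def get_instructions_alt (puzzle_input : List String) : List String × List (List Int) :=
  match PySem.List.index? puzzle_input "" with
  | none => (puzzle_input, [])
  | some idx =>
      (PySem.List.slice puzzle_input none (some (idx : Int)),
       ((PySem.List.slice puzzle_input (some ((idx : Int) + 1)) none).filter
          (fun line => line ≠ "")).map pvParseLine)

-- ===== PRECONDITION & SPEC =====
-- Pre_ excludes exactly the inputs where Python's int(x) raises ValueError (both A and B raise there):
-- every non-empty line after the first blank line must split into valid int literals.
def Pre_get_instructions (puzzle_input : List String) : Prop :=
  ∀ line ∈ puzzle_input.drop (puzzle_input.idxOf "" + 1), line ≠ "" →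
    ∀ x ∈ (PySem.Str.split? line ",").getD [], (PySem.Int.ofStr? x).isSome = true
instance (puzzle_input : List String) : Decidable (Pre_get_instructions puzzle_input) := by
  unfold Pre_get_instructions; infer_instance

def pvWitness_get_instructions : List String := ["a|b", "c|a", "", "1,2", "3,4,5"]

def Spec_get_instructions (puzzle_input : List String) (out : List String × List (List Int)) : Prop := out = get_instructions_alt puzzle_input
instance (puzzle_input : List String) (out : List String × List (List Int)) : Decidable (Spec_get_instructions puzzle_input out) := by unfold Spec_get_instructions; infer_instance

-- ===== CLAIM (what is proved, stated in full; the proofs are below) =====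
def Claim_equal_get_instructions : Prop := ∀ (puzzle_input : List String), Dom_get_instructions puzzle_input → Pre_get_instructions puzzle_input → Spec_get_instructions puzzle_input (get_instructions puzzle_input)

-- ===== LEMMAS AND PROOFS =====

-- Phase 2 of A's loop: once the flag is false, every non-empty line is parsed and appended.
theorem pvFoldl_false (l : List String) (o : List String) (i : List (List Int)) :
    l.foldl pvStepA (false, o, i) =
      (false, o, i ++ (l.filter (fun x => x ≠ "")).map pvParseLine) := by
  induction l generalizing i with
  | nil => simp
  | cons h t ih =>
      by_cases hh : h = "" <;>
        simp [pvStepA, hh, ih]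

-- Phase 1 of A's loop: while no blank line has been seen, lines are appended to orders.
theorem pvFoldl_true (l : List String) (hl : "" ∉ l) (o : List String) (i : List (List Int)) :
    l.foldl pvStepA (true, o, i) = (true, o ++ l, i) := by
  induction l generalizing o with
  | nil => simp
  | cons h t ih =>
      have hh : h ≠ "" := by rintro rfl; exact hl (by simp)
      have ht : "" ∉ t := fun m => hl (by simp [m])
      have hstep : pvStepA (true, o, i) h = (true, o ++ [h], i) := by
        simp [pvStepA, hh]
      rw [List.foldl_cons, hstep, ih ht]
      simp

theorem get_instructions_spec : Claim_equal_get_instructions := by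
  intro l _ _
  unfold Spec_get_instructions get_instructions get_instructions_alt
  rcases h : PySem.List.index? l "" with _ | idx
  · have hnot : "" ∉ l := (PySem.List.index?_eq_none_iff l "").mp h
    simp [pvFoldl_true l hnot]
  · obtain ⟨pre, suf, rfl, hlen, hpre⟩ := (PySem.List.index?_eq_some_iff l "" idx).mp h
    subst hlen
    have h1 : (pre ++ "" :: suf).foldl pvStepA (true, ([] : List String), ([] : List (List Int)))
        = (false, pre, (suf.filter (fun x => x ≠ "")).map pvParseLine) := by
      rw [List.foldl_append, pvFoldl_true pre hpre]
      simp [pvStepA, pvFoldl_false]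
    have h2 : PySem.List.slice (pre ++ "" :: suf) none (some ((pre.length : Nat) : Int)) = pre := by
      rw [PySem.List.slice_to_natCast]
      simp
    have h3 : PySem.List.slice (pre ++ "" :: suf) (some (((pre.length : Nat) : Int) + 1)) none = suf := by
      have : ((pre.length : Nat) : Int) + 1 = ((pre.length + 1 : Nat) : Int) := by push_cast; ring
      rw [this, PySem.List.slice_from_natCast]
      simp [List.drop_append]
    simp only [h1, h2, h3]
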